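-- pv_equiv track=rewrite | github.com/HoiskolensChemikerforening/hc-backend | chemie/wordlist/views.py | fsort
-- ===== SOURCE A (Python) =====
-- def fsort(settet, sorteringsord):  # listesortering
--     filtersett = []
--     enerord = []
--     toerord = []
--     treerord = []
--     fireerord = []
--
--     for i in range(len(settet)):
--         a = str(settet[i][0])
--         b = list(a)
--
--         førstesortering = []
--         andresortering = []
--         tredjesortering = []
--         fjerdesortering = []
--
--         for j in range(len(b)):
--             if b[j] in sorteringsord:
--                 førstesortering.append(b[j])
--         for k in range(len(førstesortering) - 1):
--             num1 = førstesortering[k] + førstesortering[k + 1]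
--             if num1 in sorteringsord:
--                 andresortering.append(num1)
--             try:
--                 num2 = (
--                     førstesortering[k]
--                     + førstesortering[k + 1]
--                     + førstesortering[k + 2]
--                 )
--                 if num2 in sorteringsord:
--                     tredjesortering.append(num2)
--                 num3 = (
--                     førstesortering[k]
--                     + førstesortering[k + 1]
--                     + førstesortering[k + 2]
--                     + førstesortering[k + 3]
--                 )
--                 if num3 in sorteringsord:
--                     fjerdesortering.append(num3)
--             except:
--                 pass
--         if len(fjerdesortering) > 0:
--             fireerord.append(settet[i])
--         else:
--             if len(tredjesortering) > 0:
--                 treerord.append(settet[i])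
--             else:
--                 if len(andresortering) > 0:
--                     toerord.append(settet[i])
--                 else:
--                     if len(førstesortering) > 0:
--                         enerord.append(settet[i])
--
--     for i in fireerord:
--         filtersett.append(i)
--     for i in treerord:
--         filtersett.append(i)
--     for i in toerord:
--         filtersett.append(i)
--     for i in enerord:
--         filtersett.append(i)
--
--     return filtersett
-- ===== SOURCE B (Python) =====
-- def fsort(settet, sorteringsord):
--     # Each word only ever contributes str(word[0]) (a single character), so the
--     # 2/3/4-gram buckets in the original are unreachable: the result is simply
--     # the words whose first character is in sorteringsord, in input order.
--     return [word for word in settet if word[0] in sorteringsord]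
-- ===== Notes on version B (the rewrite author's own statement) =====
-- stated objective: simpler
-- what changed: Replaced the four-bucket multi-pass classifier (per-word n-gram window loops plus four concatenation loops) by a single membership filter on the first character, which is all the original can ever test since each word contributes only str(word[0]).
-- outside the precondition, e.g. on fsort([''], ['a']): A raises IndexError, B raises IndexError
import Mathlib
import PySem

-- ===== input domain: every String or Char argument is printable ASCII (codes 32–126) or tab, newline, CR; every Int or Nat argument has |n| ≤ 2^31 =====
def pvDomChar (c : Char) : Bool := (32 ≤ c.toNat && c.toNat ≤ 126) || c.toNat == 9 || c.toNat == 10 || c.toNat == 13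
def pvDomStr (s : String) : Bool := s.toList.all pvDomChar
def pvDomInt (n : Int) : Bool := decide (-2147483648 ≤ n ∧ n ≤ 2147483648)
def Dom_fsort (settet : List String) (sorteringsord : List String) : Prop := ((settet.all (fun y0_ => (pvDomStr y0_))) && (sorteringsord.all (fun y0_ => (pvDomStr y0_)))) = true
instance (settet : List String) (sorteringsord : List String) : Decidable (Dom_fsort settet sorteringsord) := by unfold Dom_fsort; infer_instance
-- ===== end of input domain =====

-- B replaces A's four-bucket multi-pass classifier by a single first-character
-- membership filter (simpler); equal on all inputs without empty-string words.

-- ===== PORT A =====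
-- per-word body of A's outer loop; state = (enerord, toerord, treerord, fireerord)
def fsortStep (sorteringsord : List String)
    (st : List String × List String × List String × List String) (wi : String) :
    List String × List String × List String × List String :=
  match PySem.Str.pyGet? wi 0 with
  | none => st  -- Python raises IndexError on settet[i][0] here; excluded by Pre_fsort
  | some c =>
    -- a = str(settet[i][0]); b = list(a)  (a list of 1-char strings)
    let a : String := String.ofList [c]
    let b : List String := a.toList.map (fun ch => String.ofList [ch])
    -- for j in range(len(b)): if b[j] in sorteringsord: førstesortering.append(b[j])
    let fs := b.foldl (fun acc s => if s ∈ sorteringsord then acc ++ [s] else acc) []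
    -- for k in range(len(førstesortering) - 1): … (try/except IndexError = the none cases)
    let atf := (PySem.List.pyRange 0 ((fs.length : Int) - 1) 1).foldl
      (fun (acc : List String × List String × List String) k =>
        match PySem.List.pyGet? fs k, PySem.List.pyGet? fs (k + 1) with
        | some x, some y =>
          let an' := if x ++ y ∈ sorteringsord then acc.1 ++ [x ++ y] else acc.1
          (match PySem.List.pyGet? fs (k + 2) with
           | some z =>
             let tr' := if x ++ y ++ z ∈ sorteringsord then acc.2.1 ++ [x ++ y ++ z] else acc.2.1
             (match PySem.List.pyGet? fs (k + 3) with
              | some u =>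
                (an', tr', if x ++ y ++ z ++ u ∈ sorteringsord then acc.2.2 ++ [x ++ y ++ z ++ u] else acc.2.2)
              | none => (an', tr', acc.2.2))
           | none => (an', acc.2.1, acc.2.2))
        | _, _ => acc) ([], [], [])
    if atf.2.2.length > 0 then (st.1, st.2.1, st.2.2.1, st.2.2.2 ++ [wi])
    else if atf.2.1.length > 0 then (st.1, st.2.1, st.2.2.1 ++ [wi], st.2.2.2)
    else if atf.1.length > 0 then (st.1, st.2.1 ++ [wi], st.2.2.1, st.2.2.2)
    else if fs.length > 0 then (st.1 ++ [wi], st.2.1, st.2.2.1, st.2.2.2)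
    else st

def fsort (settet : List String) (sorteringsord : List String) : List String :=
  let st := settet.foldl (fsortStep sorteringsord) ([], [], [], [])
  -- four concatenation loops: fireerord, treerord, toerord, enerord
  let f1 := st.2.2.2.foldl (fun acc i => acc ++ [i]) []
  let f2 := st.2.2.1.foldl (fun acc i => acc ++ [i]) f1
  let f3 := st.2.1.foldl (fun acc i => acc ++ [i]) f2
  st.1.foldl (fun acc i => acc ++ [i]) f3

-- ===== PORT B =====
def fsort_alt (settet : List String) (sorteringsord : List String) : List String :=
  settet.filter (fun w =>
    match PySem.Str.pyGet? w 0 with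
    | some c => decide (String.ofList [c] ∈ sorteringsord)
    | none => false)

-- ===== PRECONDITION & SPEC =====
-- Pre_ excludes empty-string words, on which A raises IndexError at settet[i][0].
def Pre_fsort (settet : List String) (sorteringsord : List String) : Prop :=
  ∀ w ∈ settet, w ≠ ""
instance (settet : List String) (sorteringsord : List String) : Decidable (Pre_fsort settet sorteringsord) := by unfold Pre_fsort; infer_instance

def pvWitness_fsort : List String × List String := (["ab", "c"], ["a"])

def Spec_fsort (settet : List String) (sorteringsord : List String) (out : List String) : Prop := out = fsort_alt settet sorteringsord
instance (settet : List String) (sorteringsord : List String) (out : List String) : Decidable (Spec_fsort settet sorteringsord out) := by unfold Spec_fsort; infer_instance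

-- ===== CLAIM (what is proved, stated in full; the proofs are below) =====
def Claim_equal_fsort : Prop := ∀ (settet : List String) (sorteringsord : List String), Dom_fsort settet sorteringsord → Pre_fsort settet sorteringsord → Spec_fsort settet sorteringsord (fsort settet sorteringsord)

-- ===== LEMMAS AND PROOFS =====

-- on a nonempty word, A's per-word body only ever touches the enerord bucket
theorem fsortStep_eq (so : List String) (st : List String × List String × List String × List String)
    (w : String) (c : Char) (cs : List Char) (hcl : w.toList = c :: cs) :
    fsortStep so st w =
      (if String.ofList [c] ∈ so then (st.1 ++ [w], st.2.1, st.2.2.1, st.2.2.2) else st) := by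
  have hget : PySem.List.pyGet? w.toList 0 = some c := by
    rw [hcl]; exact PySem.List.pyGet?_zero_cons c cs
  by_cases hmem : String.ofList [c] ∈ so <;>
    simp [fsortStep, PySem.Str.pyGet?, PySem.Chars.pyGet?, hget, hmem,
      String.toList_ofList, PySem.List.pyRange]

theorem fsort_loop (so : List String) :
    ∀ (l : List String), (∀ w ∈ l, w ≠ "") → ∀ (ener : List String),
      l.foldl (fsortStep so) (ener, [], [], []) = (ener ++ fsort_alt l so, [], [], []) := by
  intro l
  induction l with
  | nil => intro _ ener; simp [fsort_alt]
  | cons w t ih =>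
    intro h ener
    have hw : w ≠ "" := h w (by simp)
    obtain ⟨c, cs, hcl⟩ : ∃ c cs, w.toList = c :: cs := by
      cases hcase : w.toList with
      | nil => exact absurd (by simpa using congrArg String.ofList hcase) hw
      | cons c cs => exact ⟨c, cs, rfl⟩
    have hpred : PySem.List.pyGet? w.toList 0 = some c := by
      rw [hcl]; exact PySem.List.pyGet?_zero_cons c cs
    rw [List.foldl_cons, fsortStep_eq so _ w c cs hcl]
    have ht := ih (fun x hx => h x (List.mem_cons_of_mem _ hx))
    by_cases hmem : String.ofList [c] ∈ so
    · rw [if_pos hmem, ht (ener ++ [w])]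
      simp [fsort_alt, hpred, hmem]
    · rw [if_neg hmem, ht ener]
      simp [fsort_alt, hpred, hmem]

-- ===== VERDICT (by name: the statement is the Claim_ definition above) =====
theorem fsort_spec : Claim_equal_fsort := by
  intro settet sorteringsord _ hpre
  unfold Spec_fsort fsort
  rw [fsort_loop sorteringsord settet hpre []]
  simp only [PySem.List.foldl_append_singleton_eq_self, List.nil_append]
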